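-- pv_equiv track=rewrite | github.com/maripasa/ESTD | lists/hash_project.py | fold
-- ===== SOURCE A (Python) =====
-- def fold(x):
--     num = str(x)
--     if len(num) <= 2:
--         return x % 32
--     if len(num) % 2 != 0:
--         num = "0" + num
--     num = str((int(num[1]) + int(num[2])) % 10) + str((int(num[0]) + int(num[3])) % 10) + num[4:]
--     return fold(int(num))
-- ===== SOURCE B (Python) =====
-- def fold(x):
--     # Pure-arithmetic reformulation: instead of round-tripping through str()/int(),
--     # each folding step extracts the top four digits and the tail with // and %.
--     while x > 99:
--         n, t = 1, x
--         while t >= 10: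
--             t //= 10
--             n += 1
--         if n % 2:
--             n += 1
--         p = 10 ** (n - 4)
--         d3 = (x // p) % 10
--         d2 = (x // (10 * p)) % 10
--         d1 = (x // (100 * p)) % 10
--         d0 = x // (1000 * p)
--         x = ((d1 + d2) % 10) * 10 * p + ((d0 + d3) % 10) * p + x % p
--     return x % 32
-- ===== Notes on version B (the rewrite author's own statement) =====
-- stated objective: alternative
-- what changed: B replaces A's tail recursion through str()/int() round-trips by an iterative loop that extracts the four leading digits and the tail purely arithmetically with // and %, never converting to a string.
-- outside the precondition, e.g. on fold(-10): A raises ValueError, B returns 22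
import Mathlib
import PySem

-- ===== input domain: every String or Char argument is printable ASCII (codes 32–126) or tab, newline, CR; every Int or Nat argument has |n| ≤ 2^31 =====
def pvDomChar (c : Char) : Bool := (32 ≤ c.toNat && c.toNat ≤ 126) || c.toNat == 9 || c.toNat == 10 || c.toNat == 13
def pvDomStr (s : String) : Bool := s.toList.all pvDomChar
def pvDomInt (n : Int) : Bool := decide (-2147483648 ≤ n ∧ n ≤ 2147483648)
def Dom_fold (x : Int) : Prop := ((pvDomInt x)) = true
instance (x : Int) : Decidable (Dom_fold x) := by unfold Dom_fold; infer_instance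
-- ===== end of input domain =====

-- B replaces A's str()/int() round-trips by pure integer arithmetic (// and % extract the
-- four leading digits and the tail directly); same return value on every input A accepts.

-- ===== PORT A =====
-- int(s): every string this program passes to int() is a nonempty string of ASCII decimal
-- digits (no sign, space or underscore); on that domain Python's int(s) is exactly this
-- left-to-right fold (ported by hand so the proofs can unfold it).
def pvIntOfDigits (cs : List Char) : Int :=
  ((cs.foldl (fun a c => a * 10 + (c.toNat - '0'.toNat)) 0 : Nat) : Int)

-- the recursion of A, with fuel; fuel = len(str(x)) suffices because each recursive call
-- strictly shortens str(x) (proved below), so the 0-fuel branch is never reached.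
def foldGo : Nat → Int → Int
  | 0, _ => 0
  | fuel+1, x =>
    let num := PySem.Int.toChars x
    if num.length ≤ 2 then PySem.Int.mod x 32
    else
      let num := if num.length % 2 ≠ 0 then '0' :: num else num
      let num := PySem.Int.toChars (PySem.Int.mod
                    (pvIntOfDigits [PySem.List.pyGetD num 1 ' '] +
                     pvIntOfDigits [PySem.List.pyGetD num 2 ' ']) 10)
               ++ PySem.Int.toChars (PySem.Int.mod
                    (pvIntOfDigits [PySem.List.pyGetD num 0 ' '] +
                     pvIntOfDigits [PySem.List.pyGetD num 3 ' ']) 10)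
               ++ PySem.List.slice num (some 4)
      foldGo fuel (pvIntOfDigits num)

def fold (x : Int) : Int := foldGo (PySem.Int.toChars x).length x

-- ===== PORT B =====
-- the inner `n, t = 1, x; while t >= 10: t //= 10; n += 1` loop of B
def pvDigitCount (t n : Int) : Int :=
  if 10 ≤ t then pvDigitCount (PySem.Int.floordiv t 10) (n + 1) else n
termination_by t.toNat
decreasing_by
  rw [PySem.Int.floordiv_eq_ediv_of_pos (by omega : (0:Int) < 10)]
  have h1 : 10 * (t / 10) + t % 10 = t := Int.mul_ediv_add_emod t 10
  have h2 : 0 ≤ t % 10 := Int.emod_nonneg t (by omega)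
  have h3 : t % 10 < 10 := Int.emod_lt_of_pos t (by omega)
  omega

-- the outer `while x > 99` loop of B, with fuel; the loop value strictly decreases while
-- positive (proved below), so fuel = x.toNat + 1 bounds the number of iterations.
def pvAltGo : Nat → Int → Int
  | 0, _ => 0
  | fuel+1, x =>
    if 99 < x then
      let n := pvDigitCount x 1
      let n := if PySem.Int.mod n 2 ≠ 0 then n + 1 else n
      let p : Int := 10 ^ (n - 4).toNat    -- 10 ** (n - 4); n ≥ 4 whenever this is reached
      let d3 := PySem.Int.mod (PySem.Int.floordiv x p) 10
      let d2 := PySem.Int.mod (PySem.Int.floordiv x (10 * p)) 10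
      let d1 := PySem.Int.mod (PySem.Int.floordiv x (100 * p)) 10
      let d0 := PySem.Int.floordiv x (1000 * p)
      pvAltGo fuel (PySem.Int.mod (d1 + d2) 10 * 10 * p + PySem.Int.mod (d0 + d3) 10 * p +
                      PySem.Int.mod x p)
    else PySem.Int.mod x 32

def fold_alt (x : Int) : Int := pvAltGo (x.toNat + 1) x

-- ===== PRECONDITION & SPEC =====
-- Pre_ excludes exactly the inputs x ≤ -10, on which A raises ValueError
-- (int() applied to the '-' character after padding); A returns on every x ≥ -9.
def Pre_fold (x : Int) : Prop := -9 ≤ x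
instance (x : Int) : Decidable (Pre_fold x) := by unfold Pre_fold; infer_instance
def pvWitness_fold : Int := 1234

def Spec_fold (x : Int) (out : Int) : Prop := out = fold_alt x
instance (x : Int) (out : Int) : Decidable (Spec_fold x out) := by unfold Spec_fold; infer_instance

-- ===== CLAIM (what is proved, stated in full; the proofs are below) =====
def Claim_equal_fold : Prop := ∀ (x : Int), Dom_fold x → Pre_fold x → Spec_fold x (fold x)
-- ===== LEMMAS AND PROOFS =====

-- the Nat-valued digit-string evaluator underlying pvIntOfDigits
def pvVal (cs : List Char) : Nat := cs.foldl (fun a c => a * 10 + (c.toNat - '0'.toNat)) 0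

theorem pvIntOfDigits_eq (cs : List Char) : pvIntOfDigits cs = ((pvVal cs : Nat) : Int) := rfl

theorem pvVal_shift (cs : List Char) : ∀ a : Nat,
    cs.foldl (fun a c => a * 10 + (c.toNat - '0'.toNat)) a = a * 10 ^ cs.length + pvVal cs := by
  induction cs with
  | nil => intro a; simp [pvVal]
  | cons c cs ih =>
    intro a
    simp only [List.foldl_cons, List.length_cons, pvVal] at *
    rw [ih, ih (0 * 10 + (c.toNat - '0'.toNat))]
    ring

theorem pvVal_append (u v : List Char) :
    pvVal (u ++ v) = pvVal u * 10 ^ v.length + pvVal v := by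
  unfold pvVal
  rw [List.foldl_append]
  exact pvVal_shift v _

theorem pvDigitChar_toNat {d : Nat} (h : d < 10) : (Nat.digitChar d).toNat - '0'.toNat = d := by
  interval_cases d <;> decide

theorem pvVal_revmap : ∀ (ds : List Nat), (∀ d ∈ ds, d < 10) →
    pvVal ((ds.map Nat.digitChar).reverse) = Nat.ofDigits 10 ds := by
  intro ds
  induction ds with
  | nil => intro _; simp [pvVal, Nat.ofDigits_nil]
  | cons d ds ih =>
    intro h
    simp only [List.map_cons, List.reverse_cons]
    rw [pvVal_append, ih (fun e he => h e (List.mem_cons_of_mem d he)), Nat.ofDigits_cons]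
    have h1 : pvVal [Nat.digitChar d] = d := by
      show 0 * 10 + ((Nat.digitChar d).toNat - '0'.toNat) = d
      rw [pvDigitChar_toNat (h d List.mem_cons_self)]
      omega
    simp only [h1, List.length_cons, List.length_nil]
    ring

theorem pvToDigitsCore_eq : ∀ (f : Nat), ∀ (n : Nat) (ds : List Char),
    (Nat.digits 10 n).length ≤ f → 0 < n →
    Nat.toDigitsCore 10 f n ds = ((Nat.digits 10 n).map Nat.digitChar).reverse ++ ds := by
  intro f
  induction f with
  | zero =>
    intro n ds h h0
    have : Nat.digits 10 n ≠ [] := Nat.digits_ne_nil_iff_ne_zero.mpr (by omega)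
    have := List.length_pos_of_ne_nil this
    omega
  | succ f ih =>
    intro n ds h h0
    have hd : Nat.digits 10 n = n % 10 :: Nat.digits 10 (n / 10) :=
      Nat.digits_def' (by norm_num) h0
    simp only [Nat.toDigitsCore]
    by_cases hq : n / 10 = 0
    · rw [if_pos hq, hd, hq]
      simp
    · rw [if_neg hq]
      have hlen : (Nat.digits 10 (n / 10)).length ≤ f := by
        have := congrArg List.length hd
        simp only [List.length_cons] at this
        omega
      rw [ih (n / 10) _ hlen (Nat.pos_of_ne_zero hq), hd]
      simp

theorem pvToChars_pos {x : Int} (hx : 0 < x) :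
    PySem.Int.toChars x = ((Nat.digits 10 x.toNat).map Nat.digitChar).reverse := by
  rw [PySem.Int.toChars, if_neg (by omega), Nat.toDigits]
  rw [pvToDigitsCore_eq (x.toNat + 1) x.toNat []
    (by
      rw [Nat.length_digits 10 x.toNat (by norm_num) (by omega)]
      have := Nat.log_le_self 10 x.toNat
      omega)
    (by omega)]
  simp

theorem pvToChars_len {x : Int} (hx : 0 ≤ x) :
    (PySem.Int.toChars x).length = if x = 0 then 1 else Nat.log 10 x.toNat + 1 := by
  by_cases h0 : x = 0
  · subst h0; simp [PySem.Int.toChars]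
  · rw [if_neg h0, pvToChars_pos (by omega)]
    simp [Nat.length_digits 10 x.toNat (by norm_num) (by omega)]

theorem pvToChars_len_pos {x : Int} (hx : 0 ≤ x) : 1 ≤ (PySem.Int.toChars x).length := by
  rw [pvToChars_len hx]
  split <;> omega

theorem pvLenLe2 {x : Int} (hx : 0 ≤ x) : ((PySem.Int.toChars x).length ≤ 2 ↔ x ≤ 99) := by
  rw [pvToChars_len hx]
  by_cases h0 : x = 0
  · subst h0; simp
  · rw [if_neg h0]
    have hlog := Nat.log_lt_iff_lt_pow (b := 10) (by norm_num) (x := 2) (y := x.toNat) (by omega)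
    constructor
    · intro h
      have : x.toNat < 10 ^ 2 := hlog.mp (by omega)
      omega
    · intro h
      have : Nat.log 10 x.toNat < 2 := hlog.mpr (by norm_num; omega)
      omega

-- digit extraction: the i-th little-endian digit is n / 10^i % 10
def pvDg (n i : Nat) : Nat := n / 10 ^ i % 10

theorem pvDigits_getElem : ∀ (i n : Nat) (h : i < (Nat.digits 10 n).length),
    (Nat.digits 10 n)[i] = pvDg n i := by
  intro i
  induction i with
  | zero =>
    intro n h
    have hn : 0 < n := by
      by_contra hc
      have : n = 0 := by omega
      subst this
      simp at h
    rw [List.getElem_of_eq (Nat.digits_def' (by norm_num : (1:Nat) < 10) hn) h]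
    simp [pvDg]
  | succ i ih =>
    intro n h
    have hn : 0 < n := by
      by_contra hc
      have : n = 0 := by omega
      subst this
      simp at h
    have hd := Nat.digits_def' (by norm_num : (1:Nat) < 10) hn
    have hlen : i < (Nat.digits 10 (n / 10)).length := by
      have := congrArg List.length hd
      simp only [List.length_cons] at this
      omega
    rw [List.getElem_of_eq hd h, List.getElem_cons_succ, ih (n / 10) hlen]
    unfold pvDg
    rw [Nat.div_div_eq_div_mul, pow_succ, mul_comm (10 ^ i) 10, mul_comm (10 : Nat) (10 ^ i)]

-- the padded digit list (little-endian) of one folding step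
def pvE (n : Nat) : List Nat :=
  Nat.digits 10 n ++ (if (Nat.digits 10 n).length % 2 = 1 then [0] else [])

theorem pvE_lt (n : Nat) : ∀ d ∈ pvE n, d < 10 := by
  intro d hd
  rcases List.mem_append.mp hd with h | h
  · exact Nat.digits_lt_base (by norm_num) h
  · split at h
    · simp at h; omega
    · simp at h

theorem pvE_get (n : Nat) : ∀ i, (h : i < (pvE n).length) → (pvE n)[i] = pvDg n i := by
  intro i h
  unfold pvE at h ⊢
  by_cases hi : i < (Nat.digits 10 n).length
  · rw [List.getElem_append_left hi]
    exact pvDigits_getElem i n hi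
  · have hn : n ≠ 0 := by
      intro h0
      subst h0
      simp at h
    have hlt : n < 10 ^ (Nat.digits 10 n).length := by
      rw [Nat.length_digits 10 n (by norm_num) hn]
      exact Nat.lt_pow_succ_log_self (by norm_num) n
    have hdg : pvDg n i = 0 := by
      unfold pvDg
      have : n < 10 ^ i := lt_of_lt_of_le hlt (Nat.pow_le_pow_right (by norm_num) (by omega))
      rw [Nat.div_eq_of_lt this]
    rw [List.getElem_append_right (by omega), hdg]
    rw [List.length_append] at h
    by_cases hcond : (Nat.digits 10 n).length % 2 = 1
    · simp only [hcond, if_pos] at h ⊢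
      have h0 : i - (Nat.digits 10 n).length = 0 := by
        simp only [List.length_cons, List.length_nil] at h
        omega
      simp [h0]
    · simp only [hcond, if_false] at h
      simp only [List.length_nil] at h
      omega

theorem pvE_len_split (n : Nat) : (pvE n).length =
    (Nat.digits 10 n).length + (if (Nat.digits 10 n).length % 2 = 1 then 1 else 0) := by
  unfold pvE
  rw [List.length_append]
  split <;> rfl

theorem pvE_even (n : Nat) : (pvE n).length % 2 = 0 := by
  have h := pvE_len_split n
  split at h <;> omega

-- length bookkeeping for 100 ≤ n, with L = digits length, m = padded length
theorem pvL_facts {n : Nat} (hn : 100 ≤ n) :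
    3 ≤ (Nat.digits 10 n).length ∧
    (Nat.digits 10 n).length ≤ (pvE n).length ∧
    (pvE n).length ≤ (Nat.digits 10 n).length + 1 ∧
    (Nat.digits 10 n).length = Nat.log 10 n + 1 := by
  have hL := Nat.length_digits 10 n (by norm_num) (by omega)
  have hlog : 2 ≤ Nat.log 10 n :=
    (Nat.pow_le_iff_le_log (by norm_num) (by omega)).mp (by norm_num; omega)
  have h := pvE_len_split n
  split at h <;> exact ⟨by omega, by omega, by omega, hL⟩

theorem pvTake_mod : ∀ (k n : Nat),
    Nat.ofDigits 10 (List.take k (Nat.digits 10 n)) = n % 10 ^ k := by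
  intro k
  induction k with
  | zero => intro n; simp [Nat.mod_one]
  | succ k ih =>
    intro n
    by_cases hn : n = 0
    · subst hn; simp
    · rw [Nat.digits_def' (by norm_num : (1:Nat) < 10) (by omega), List.take_succ_cons,
        Nat.ofDigits_cons, ih (n / 10)]
      have hB : 0 < 10 ^ k := pow_pos (by norm_num : (0:ℕ) < 10) k
      have hA : n / 10 % 10 ^ k < 10 ^ k := Nat.mod_lt _ hB
      have hr : n % 10 < 10 := Nat.mod_lt _ (by norm_num)
      have hsplit : 10 * (n / 10) + n % 10 = n := Nat.div_add_mod n 10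
      have e2 : (10 * (n / 10)) % (10 * 10 ^ k) = 10 * (n / 10 % 10 ^ k) :=
        Nat.mul_mod_mul_left 10 (n / 10) (10 ^ k)
      have e3 : n % (10 * 10 ^ k) = ((10 * (n / 10)) % (10 * 10 ^ k) + (n % 10) % (10 * 10 ^ k))
          % (10 * 10 ^ k) := by
        conv_lhs => rw [← hsplit]
        rw [Nat.add_mod]
      rw [Nat.mod_eq_of_lt (show n % 10 < 10 * 10 ^ k by omega)] at e3
      rw [e2] at e3
      rw [show (10 * (n / 10 % 10 ^ k) + n % 10) % (10 * 10 ^ k)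
            = 10 * (n / 10 % 10 ^ k) + n % 10 from Nat.mod_eq_of_lt (by omega)] at e3
      rw [pow_succ, mul_comm (10 ^ k) 10, e3]
      omega

theorem pvToDigits_single {v : Nat} (h : v < 10) : Nat.toDigits 10 v = [Nat.digitChar v] := by
  interval_cases v <;> decide

theorem pvToChars_single {v : Nat} (h : v < 10) :
    PySem.Int.toChars ((v : Nat) : Int) = [Nat.digitChar v] := by
  rw [PySem.Int.toChars, if_neg (by omega), Int.toNat_natCast]
  exact pvToDigits_single h

-- the common one-step value
def pvStep (n m : Nat) : Nat :=
  ((pvDg n (m-2) + pvDg n (m-3)) % 10) * 10 ^ (m-3) +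
  ((pvDg n (m-1) + pvDg n (m-4)) % 10) * 10 ^ (m-4) + n % 10 ^ (m-4)

theorem pvStep_lt {n m : Nat} (hm : 4 ≤ m) : pvStep n m < 10 ^ (m-2) := by
  unfold pvStep
  have e3 : m - 3 = (m - 4) + 1 := by omega
  have e2 : m - 2 = (m - 4) + 2 := by omega
  rw [e3, e2, pow_succ, pow_add]
  have hP : 0 < 10 ^ (m - 4) := pow_pos (by norm_num : (0:ℕ) < 10) _
  have h1 : (pvDg n (m - 4 + 2) + pvDg n (m - 4 + 1)) % 10 ≤ 9 := by
    have := Nat.mod_lt (pvDg n (m - 4 + 2) + pvDg n (m - 4 + 1)) (show 0 < 10 by norm_num)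
    omega
  have h2 : (pvDg n (m - 1) + pvDg n (m - 4)) % 10 ≤ 9 := by
    have := Nat.mod_lt (pvDg n (m - 1) + pvDg n (m - 4)) (show 0 < 10 by norm_num)
    omega
  have h3 : n % 10 ^ (m - 4) < 10 ^ (m - 4) := Nat.mod_lt _ hP
  have b1 := Nat.mul_le_mul_right (10 ^ (m - 4) * 10) h1
  have b2 := Nat.mul_le_mul_right (10 ^ (m - 4)) h2
  linarith

theorem pvDigitCount_aux : ∀ (k : Nat) (t : Int), 1 ≤ t → t.toNat ≤ k → ∀ n : Int,
    pvDigitCount t n = n + (Nat.log 10 t.toNat : Int) := by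
  intro k
  induction k with
  | zero => intro t ht hk; omega
  | succ k ih =>
    intro t ht hk n
    rw [pvDigitCount]
    by_cases h10 : 10 ≤ t
    · rw [if_pos h10, PySem.Int.floordiv_eq_ediv_of_pos (by omega : (0:Int) < 10)]
      have hcast : t / 10 = ((t.toNat / 10 : Nat) : Int) := by
        rw [Int.natCast_ediv]
        congr 1
        omega
      have hq1 : 1 ≤ t / 10 := by
        have h1 : 10 * (t / 10) + t % 10 = t := Int.mul_ediv_add_emod t 10
        have h2 : 0 ≤ t % 10 := Int.emod_nonneg t (by omega)
        have h3 : t % 10 < 10 := Int.emod_lt_of_pos t (by omega)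
        omega
      have hqk : (t / 10).toNat ≤ k := by
        rw [hcast, Int.toNat_natCast]
        omega
      rw [ih (t / 10) hq1 hqk (n + 1)]
      have hlogq : Nat.log 10 (t / 10).toNat = Nat.log 10 t.toNat - 1 := by
        rw [hcast, Int.toNat_natCast]
        exact Nat.log_div_base 10 t.toNat
      have hlogpos : 0 < Nat.log 10 t.toNat :=
        Nat.log_pos (by norm_num) (by omega)
      rw [hlogq]
      push_cast [Nat.cast_sub hlogpos]
      ring
    · rw [if_neg h10]
      have : Nat.log 10 t.toNat = 0 := by
        rw [Nat.log_eq_zero_iff]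
        omega
      rw [this]
      simp

theorem pvDigitCount_eq (t : Int) (ht : 1 ≤ t) (n : Int) :
    pvDigitCount t n = n + (Nat.log 10 t.toNat : Int) :=
  pvDigitCount_aux t.toNat t ht le_rfl n

theorem pvArgB (x : Int) (hx : 99 < x) :
    (let n := pvDigitCount x 1
     let n := if PySem.Int.mod n 2 ≠ 0 then n + 1 else n
     let p : Int := 10 ^ (n - 4).toNat
     let d3 := PySem.Int.mod (PySem.Int.floordiv x p) 10
     let d2 := PySem.Int.mod (PySem.Int.floordiv x (10 * p)) 10
     let d1 := PySem.Int.mod (PySem.Int.floordiv x (100 * p)) 10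
     let d0 := PySem.Int.floordiv x (1000 * p)
     PySem.Int.mod (d1 + d2) 10 * 10 * p + PySem.Int.mod (d0 + d3) 10 * p + PySem.Int.mod x p)
    = ((pvStep x.toNat (pvE x.toNat).length : Nat) : Int) := by
  obtain ⟨hL3, hLm, hmL1, hLlog⟩ := pvL_facts (show 100 ≤ x.toNat by omega)
  have hEv := pvE_even x.toNat
  have hms := pvE_len_split x.toNat
  set n := x.toNat with hndef
  set L := (Nat.digits 10 n).length with hLdef
  set m := (pvE n).length with hmdef
  have hxn : x = (n : Int) := by omega
  have hm4 : 4 ≤ m := by omega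
  have hdc : pvDigitCount x 1 = (L : Int) := by
    rw [pvDigitCount_eq x (by omega) 1, hLlog]; push_cast; ring
  simp only [hdc]
  have hmod2 : PySem.Int.mod (L:Int) 2 = ((L % 2 : Nat) : Int) := by
    exact_mod_cast PySem.Int.mod_natCast L 2
  have hpad : (if PySem.Int.mod (L:Int) 2 ≠ 0 then (L:Int) + 1 else (L:Int)) = (m : Int) := by
    by_cases hp : L % 2 = 1
    · rw [if_pos (by rw [hmod2, hp]; norm_num), hms, if_pos hp]; push_cast; ring
    · rw [if_neg (by rw [hmod2]; simp; omega), hms, if_neg hp]; push_cast; ring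
  simp only [hpad]
  have hm4' : ((m:Int) - 4).toNat = m - 4 := by omega
  simp only [hm4']
  have hdiv : ∀ k : Nat, PySem.Int.floordiv x ((10 ^ k : Nat) : Int) = ((n / 10 ^ k : Nat) : Int) := by
    intro k
    rw [PySem.Int.floordiv_eq_ediv_of_pos (by positivity), hxn, ← Int.natCast_ediv]
  have hmodx : ∀ k : Nat, PySem.Int.mod x ((10 ^ k : Nat) : Int) = ((n % 10 ^ k : Nat) : Int) := by
    intro k
    rw [hxn]
    exact_mod_cast PySem.Int.mod_natCast n (10 ^ k)
  have hmod10 : ∀ a : Nat, PySem.Int.mod ((a : Nat) : Int) 10 = ((a % 10 : Nat) : Int) := by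
    intro a
    exact_mod_cast PySem.Int.mod_natCast a 10
  have e1 : (10:Int) ^ (m - 4) = ((10 ^ (m - 4) : Nat) : Int) := by push_cast; ring
  have e2 : (10:Int) * ((10 ^ (m - 4) : Nat) : Int) = ((10 ^ (m - 3) : Nat) : Int) := by
    have : m - 3 = (m - 4) + 1 := by omega
    rw [this]; push_cast; ring
  have e3 : (100:Int) * ((10 ^ (m - 4) : Nat) : Int) = ((10 ^ (m - 2) : Nat) : Int) := by
    have : m - 2 = (m - 4) + 2 := by omega
    rw [this]; push_cast; ring
  have e4 : (1000:Int) * ((10 ^ (m - 4) : Nat) : Int) = ((10 ^ (m - 1) : Nat) : Int) := by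
    have : m - 1 = (m - 4) + 3 := by omega
    rw [this]; push_cast; ring
  simp only [e1, e2, e3, e4, hdiv, hmodx, hmod10]
  have hnm : n < 10 ^ m := by
    have h1 : n < 10 ^ L := by rw [hLlog]; exact Nat.lt_pow_succ_log_self (by norm_num) n
    exact lt_of_lt_of_le h1 (Nat.pow_le_pow_right (by norm_num) hLm)
  have hd0 : n / 10 ^ (m - 1) < 10 := by
    rw [Nat.div_lt_iff_lt_mul (pow_pos (by norm_num : (0:ℕ) < 10) _)]
    calc n < 10 ^ m := hnm
      _ = 10 * 10 ^ (m - 1) := by rw [← pow_succ']; congr 1; omega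
  rw [show (↑(n / 10 ^ (m - 1)) : Int) = ↑(pvDg n (m - 1)) from by
        unfold pvDg; rw [Nat.mod_eq_of_lt hd0]]
  rw [← Nat.cast_add, ← Nat.cast_add, hmod10, hmod10]
  have eN : (10:Nat) ^ (m - 3) = 10 ^ (m - 4) * 10 := by
    rw [show m - 3 = m - 4 + 1 by omega, pow_succ]
  unfold pvStep pvDg
  rw [eN]
  push_cast
  ring

theorem pvStepB (f : Nat) (x : Int) (hx : 99 < x) :
    pvAltGo (f+1) x = pvAltGo f ((pvStep x.toNat (pvE x.toNat).length : Nat) : Int) := by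
  rw [pvAltGo, if_pos hx]
  exact congrArg (pvAltGo f) (pvArgB x hx)

theorem pvStepA (f : Nat) (x : Int) (hx : 99 < x) :
    foldGo (f+1) x = foldGo f ((pvStep x.toNat (pvE x.toNat).length : Nat) : Int) := by
  obtain ⟨hL3, hLm, hmL1, hLlog⟩ := pvL_facts (show 100 ≤ x.toNat by omega)
  have hEv := pvE_even x.toNat
  have hms := pvE_len_split x.toNat
  have hnum := pvToChars_pos (show (0:Int) < x by omega)
  set n := x.toNat with hndef
  set L := (Nat.digits 10 n).length with hLdef
  set m := (pvE n).length with hmdef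
  have hm4 : 4 ≤ m := by omega
  rw [foldGo, hnum]
  rw [if_neg (by simp only [List.length_reverse, List.length_map]; omega)]
  have hpadded : (if ((Nat.digits 10 n).map Nat.digitChar).reverse.length % 2 ≠ 0 then
        '0' :: ((Nat.digits 10 n).map Nat.digitChar).reverse
      else ((Nat.digits 10 n).map Nat.digitChar).reverse)
      = ((pvE n).map Nat.digitChar).reverse := by
    simp only [List.length_reverse, List.length_map, ← hLdef]
    unfold pvE
    by_cases hp : L % 2 = 1
    · rw [if_pos (by omega), if_pos hp]
      simp [Nat.digitChar]
    · rw [if_neg (by omega), if_neg hp]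
      simp
  rw [hpadded]
  have hgetAux : ∀ (j : Nat), j < 4 →
      (((pvE n).map Nat.digitChar).reverse).getD j ' ' = Nat.digitChar (pvDg n (m - 1 - j)) := by
    intro j hj
    have hjm : j < (((pvE n).map Nat.digitChar).reverse).length := by
      simp only [List.length_reverse, List.length_map, ← hmdef]
      omega
    rw [List.getD_eq_getElem _ _ hjm, List.getElem_reverse, List.getElem_map]
    congr 1
    rw [pvE_get n _ (by simp only [List.length_map] at *; omega)]
    congr 1
    simp only [List.length_map]
    omega
  have hg0 : PySem.List.pyGetD (((pvE n).map Nat.digitChar).reverse) 0 ' '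
      = Nat.digitChar (pvDg n (m - 1)) := by
    rw [PySem.List.pyGetD_ofNat', hgetAux 0 (by omega), show m - 1 - 0 = m - 1 by omega]
  have hg1 : PySem.List.pyGetD (((pvE n).map Nat.digitChar).reverse) 1 ' '
      = Nat.digitChar (pvDg n (m - 2)) := by
    rw [PySem.List.pyGetD_ofNat', hgetAux 1 (by omega), show m - 1 - 1 = m - 2 by omega]
  have hg2 : PySem.List.pyGetD (((pvE n).map Nat.digitChar).reverse) 2 ' '
      = Nat.digitChar (pvDg n (m - 3)) := by
    rw [PySem.List.pyGetD_ofNat', hgetAux 2 (by omega), show m - 1 - 2 = m - 3 by omega]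
  have hg3 : PySem.List.pyGetD (((pvE n).map Nat.digitChar).reverse) 3 ' '
      = Nat.digitChar (pvDg n (m - 4)) := by
    rw [PySem.List.pyGetD_ofNat', hgetAux 3 (by omega), show m - 1 - 3 = m - 4 by omega]
  have hDgLt : ∀ i, pvDg n i < 10 := fun i => Nat.mod_lt _ (by norm_num)
  have honeD : ∀ i, pvIntOfDigits [Nat.digitChar (pvDg n i)] = ((pvDg n i : Nat) : Int) := by
    intro i
    rw [pvIntOfDigits_eq]
    congr 1
    show 0 * 10 + ((Nat.digitChar (pvDg n i)).toNat - '0'.toNat) = pvDg n i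
    rw [pvDigitChar_toNat (hDgLt i)]
    omega
  have hsum : ∀ a b : Nat, PySem.Int.mod ((a : Int) + (b : Int)) 10 = (((a + b) % 10 : Nat) : Int) := by
    intro a b
    rw [← Nat.cast_add]
    exact_mod_cast PySem.Int.mod_natCast (a + b) 10
  have hta : PySem.Int.toChars ((((pvDg n (m-2) + pvDg n (m-3)) % 10 : Nat) : Int))
      = [Nat.digitChar ((pvDg n (m-2) + pvDg n (m-3)) % 10)] :=
    pvToChars_single (Nat.mod_lt _ (by norm_num))
  have htb : PySem.Int.toChars ((((pvDg n (m-1) + pvDg n (m-4)) % 10 : Nat) : Int))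
      = [Nat.digitChar ((pvDg n (m-1) + pvDg n (m-4)) % 10)] :=
    pvToChars_single (Nat.mod_lt _ (by norm_num))
  have hslice : PySem.List.slice (((pvE n).map Nat.digitChar).reverse) (some 4)
      = ((List.take (m - 4) (pvE n)).map Nat.digitChar).reverse := by
    rw [PySem.List.slice_from _ (by norm_num : (0:Int) ≤ 4)]
    rw [List.drop_reverse]
    congr 1
    rw [List.map_take]
    congr 2
    simp only [List.length_map]
    omega
  simp only [hg0, hg1, hg2, hg3, honeD, hsum, hta, htb, hslice]
  have hValOne : ∀ v : Nat, v < 10 → pvVal [Nat.digitChar v] = v := by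
    intro v hv
    show 0 * 10 + ((Nat.digitChar v).toNat - '0'.toNat) = v
    rw [pvDigitChar_toNat hv]
    omega
  have hValC : pvVal (((List.take (m - 4) (pvE n)).map Nat.digitChar).reverse)
      = n % 10 ^ (m - 4) := by
    rw [pvVal_revmap _ (fun d hd => pvE_lt n d (List.mem_of_mem_take hd))]
    unfold pvE
    rw [List.take_append_of_le_length (by omega)]
    exact pvTake_mod (m - 4) n
  have hlenC : (((List.take (m - 4) (pvE n)).map Nat.digitChar).reverse).length = m - 4 := by
    simp only [List.length_reverse, List.length_map, List.length_take]
    omega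
  refine congrArg (foldGo f) ?_
  rw [pvIntOfDigits_eq]
  refine congrArg _ ?_
  rw [pvVal_append, pvVal_append, hValC, hlenC,
    hValOne _ (Nat.mod_lt _ (by norm_num)), hValOne _ (Nat.mod_lt _ (by norm_num))]
  unfold pvStep
  simp only [List.length_cons, List.length_nil]
  rw [show (10:Nat) ^ (m - 3) = 10 * 10 ^ (m - 4) by
    rw [show m - 3 = m - 4 + 1 by omega, pow_succ]; ring]
  ring

theorem pvML : ∀ (f : Nat) (x : Int) (g : Nat), 0 ≤ x → (PySem.Int.toChars x).length ≤ f →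
    x.toNat < g → foldGo f x = pvAltGo g x := by
  intro f
  induction f with
  | zero =>
    intro x g hx hlen hg
    have := pvToChars_len_pos hx
    omega
  | succ f ih =>
    intro x g hx hlen hg
    cases g with
    | zero => omega
    | succ g =>
      by_cases h99 : x ≤ 99
      · rw [foldGo, pvAltGo, if_pos ((pvLenLe2 hx).mpr h99), if_neg (by omega)]
      · rw [pvStepA f x (by omega), pvStepB g x (by omega)]
        obtain ⟨hL3, hLm, hmL1, hLlog⟩ := pvL_facts (show 100 ≤ x.toNat by omega)
        have hEv := pvE_even x.toNat
        set n := x.toNat with hndef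
        set L := (Nat.digits 10 n).length with hLdef
        set m := (pvE n).length with hmdef
        have hm4 : 4 ≤ m := by omega
        have hSm : pvStep n m < 10 ^ (m - 2) := pvStep_lt hm4
        have hmono : (10:Nat) ^ (m - 2) ≤ 10 ^ (L - 1) :=
          Nat.pow_le_pow_right (by norm_num) (by omega)
        have hlow : (10:Nat) ^ (L - 1) ≤ n := by
          rw [hLlog, show Nat.log 10 n + 1 - 1 = Nat.log 10 n by omega]
          exact Nat.pow_log_le_self 10 (by omega)
        have hSn : pvStep n m < n := lt_of_lt_of_le (lt_of_lt_of_le hSm hmono) hlow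
        have hlenx : (PySem.Int.toChars x).length = L := by
          rw [pvToChars_len hx, if_neg (by omega), ← hLlog]
        apply ih
        · exact Int.natCast_nonneg _
        · rw [pvToChars_len (Int.natCast_nonneg _)]
          by_cases hS0 : ((pvStep n m : Nat) : Int) = 0
          · rw [if_pos hS0]
            omega
          · rw [if_neg hS0, Int.toNat_natCast]
            have hSpos : pvStep n m ≠ 0 := by
              intro h0
              rw [h0] at hS0
              exact hS0 rfl
            have hlogS : Nat.log 10 (pvStep n m) < L - 1 := by
              rw [Nat.log_lt_iff_lt_pow (by norm_num) hSpos]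
              exact lt_of_lt_of_le hSm hmono
            omega
        · rw [Int.toNat_natCast]
          omega

theorem pvFinal : ∀ (x : Int), Dom_fold x → Pre_fold x → fold x = fold_alt x := by
  intro x _ hpre
  unfold Pre_fold at hpre
  by_cases hx : 0 ≤ x
  · exact pvML _ x _ hx le_rfl (by omega)
  · have h1 : -9 ≤ x := hpre
    have h2 : x < 0 := by omega
    interval_cases x <;> decide

-- ===== VERDICT (by name: the statement is the Claim_ definition above) =====
theorem fold_spec : Claim_equal_fold := by
  unfold Claim_equal_fold Spec_fold
  exact pvFinal
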